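-- pv_equiv track=rewrite | github.com/taaaaryu/boutique-online | k8s-operator/operator/appconfig_operator.py | generate_service_combinations
-- ===== SOURCE A (Python) =====
-- from itertools import combinations, chain
--
-- def generate_service_combinations(services, num_software):
--     all_combinations = []
--     n = len(services)
--     for indices in combinations(range(n - 1), num_software - 1):
--         split_indices = list(chain([-1], indices, [n - 1]))
--         combination = [services[split_indices[i] + 1: split_indices[i + 1] + 1] for i in range(len(split_indices) - 1)]
--         all_combinations.append(combination)
--     return all_combinations
-- ===== SOURCE B (Python) =====
-- def generate_service_combinations(services, num_software):
--     if num_software < 1: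
--         raise ValueError("num_software must be at least 1")
--     n = len(services)
--
--     def partition(start, groups_left):
--         if groups_left == 1:
--             return [[services[start:]]]
--         return [[services[start:end]] + rest
--                 for end in range(start + 1, n - groups_left + 2)
--                 for rest in partition(end, groups_left - 1)]
--
--     return partition(0, num_software)
-- ===== Notes on version B (the rewrite author's own statement) =====
-- stated objective: alternative
-- what changed: B enumerates contiguous partitions by direct recursion on the first segment's end point (prepending services[start:end] to each partition of the suffix) instead of materialising (num_software-1)-subsets of split indices via itertools.combinations and slicing between consecutive indices.
import Mathlib
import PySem

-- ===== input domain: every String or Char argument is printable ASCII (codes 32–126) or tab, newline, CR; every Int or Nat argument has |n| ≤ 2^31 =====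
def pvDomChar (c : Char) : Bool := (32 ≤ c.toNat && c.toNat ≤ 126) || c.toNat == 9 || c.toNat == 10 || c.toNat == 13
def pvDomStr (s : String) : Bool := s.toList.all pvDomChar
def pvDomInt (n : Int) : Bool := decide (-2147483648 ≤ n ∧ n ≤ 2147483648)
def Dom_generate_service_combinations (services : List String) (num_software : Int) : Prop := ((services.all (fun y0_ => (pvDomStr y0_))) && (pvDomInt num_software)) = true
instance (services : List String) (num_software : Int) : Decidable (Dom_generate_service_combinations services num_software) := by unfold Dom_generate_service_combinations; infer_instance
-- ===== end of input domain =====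

-- B enumerates contiguous partitions by recursion on the first segment's end point instead of
-- enumerating split-index combinations; same cost (objective: alternative).

-- ===== PORT A =====
-- itertools.combinations(xs, k) in lexicographic order (library call, ported as the standard recursion)
def pvCombs : List Int → Nat → List (List Int)
  | _, 0 => [[]]
  | [], _ + 1 => []
  | x :: xs, k + 1 => (pvCombs xs k).map (fun c => x :: c) ++ pvCombs xs (k + 1)
termination_by xs k => xs.length + k

def generate_service_combinations (services : List String) (num_software : Int) : List (List (List String)) :=
  -- for num_software < 1 Python's combinations raises ValueError (excluded by Pre_); [] is a placeholder
  if num_software < 1 then []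
  else
    let n : Int := services.length
    (pvCombs (PySem.List.pyRange 0 (n - 1) 1) (num_software - 1).toNat).map (fun indices =>
      let split_indices : List Int := [-1] ++ indices ++ [n - 1]
      (PySem.List.pyRange 0 ((split_indices.length : Int) - 1) 1).map (fun i =>
        PySem.List.slice services (some (PySem.List.pyGetD split_indices i 0 + 1))
          (some (PySem.List.pyGetD split_indices (i + 1) 0 + 1))))

-- ===== PORT B =====
-- partition(start, groups_left) from Source B; groups_left is the Nat recursion argument
def pvPartition (services : List String) (n : Int) (start : Int) : Nat → List (List (List String))
  | 0 => []            -- unreachable: groups_left ≥ 1 at every call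
  | 1 => [[PySem.List.slice services (some start) none]]
  | k + 2 =>
      (PySem.List.pyRange (start + 1) (n - ((k : Int) + 2) + 2) 1).flatMap (fun e =>
        (pvPartition services n e (k + 1)).map (fun rest =>
          PySem.List.slice services (some start) (some e) :: rest))

def generate_service_combinations_alt (services : List String) (num_software : Int) : List (List (List String)) :=
  -- Source B raises ValueError for num_software < 1 (excluded by Pre_); [] is a placeholder
  if num_software < 1 then []
  else pvPartition services (services.length : Int) 0 num_software.toNat

-- ===== PRECONDITION & SPEC =====
-- Pre_ excludes exactly num_software < 1, on which A (and B) raise ValueError.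
def Pre_generate_service_combinations (services : List String) (num_software : Int) : Prop :=
  1 ≤ num_software
instance (services : List String) (num_software : Int) : Decidable (Pre_generate_service_combinations services num_software) := by unfold Pre_generate_service_combinations; infer_instance

def pvWitness_generate_service_combinations : List String × Int := (["a", "b", "c"], 2)

def Spec_generate_service_combinations (services : List String) (num_software : Int) (out : List (List (List String))) : Prop := out = generate_service_combinations_alt services num_software
instance (services : List String) (num_software : Int) (out : List (List (List String))) : Decidable (Spec_generate_service_combinations services num_software out) := by unfold Spec_generate_service_combinations; infer_instance

-- ===== CLAIM (what is proved, stated in full; the proofs are below) =====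
def Claim_equal_generate_service_combinations : Prop := ∀ (services : List String) (num_software : Int), Dom_generate_service_combinations services num_software → Pre_generate_service_combinations services num_software → Spec_generate_service_combinations services num_software (generate_service_combinations services num_software)

-- ===== LEMMAS AND PROOFS =====

theorem pvCombs_eq_nil (xs : List Int) : ∀ (k : Nat), xs.length < k → pvCombs xs k = [] := by
  induction xs with
  | nil => intro k h; cases k with
    | zero => omega
    | succ k => rw [pvCombs]
  | cons x xs ih =>
    intro k h
    cases k with
    | zero => omega
    | succ k =>
      have h1 : xs.length < k := by simpa using h
      rw [pvCombs, ih k h1, ih (k+1) (by omega)]; rfl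

def pvAdj (services : List String) : List Int → List (List String)
  | x :: y :: t => PySem.List.slice services (some (x + 1)) (some (y + 1)) :: pvAdj services (y :: t)
  | _ => []

theorem pvAux (services : List String) : ∀ (l : List Int),
    (List.range (l.length - 1)).map (fun k =>
      PySem.List.slice services (some (l.getD k 0 + 1)) (some (l.getD (k+1) 0 + 1)))
      = pvAdj services l := by
  intro l
  induction l with
  | nil => rfl
  | cons x t ih =>
    cases t with
    | nil => rfl
    | cons y t =>
      simp only [List.length_cons, Nat.add_sub_cancel, List.range_succ_eq_map,
        List.map_cons, List.map_map, pvAdj]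
      refine congrArg₂ List.cons rfl ?_
      rw [← ih]
      simp only [List.length_cons, Nat.add_sub_cancel]
      apply List.map_congr_left
      intro k _
      simp [Nat.succ_eq_add_one]

theorem pvComprehension_eq_adj (services : List String) (l : List Int) :
    (PySem.List.pyRange 0 ((l.length : Int) - 1) 1).map (fun i =>
        PySem.List.slice services (some (PySem.List.pyGetD l i 0 + 1))
          (some (PySem.List.pyGetD l (i + 1) 0 + 1)))
      = pvAdj services l := by
  rw [PySem.List.pyRange_one, ← pvAux services l, List.map_map]
  have hn : ((l.length : Int) - 1 - 0).toNat = l.length - 1 := by omega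
  rw [hn]
  apply List.map_congr_left
  intro k hk
  simp [Function.comp]
  rw [show (k:Int) + 1 = (((k+1) : Nat) : Int) by push_cast; ring, PySem.List.pyGetD_natCast]
  simp [List.getD]

theorem pvCombs_range_split (k : Nat) : ∀ (n : Nat) (a b : Int), (b - a).toNat = n →
    pvCombs (PySem.List.pyRange a b 1) (k + 1)
      = (PySem.List.pyRange a (b - k) 1).flatMap (fun j =>
          (pvCombs (PySem.List.pyRange (j + 1) b 1) k).map (fun c => j :: c)) := by
  intro n
  induction n with
  | zero =>
    intro a b h
    have h1 : PySem.List.pyRange a b 1 = [] := by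
      rw [PySem.List.pyRange_one, h]; rfl
    have h2 : PySem.List.pyRange a (b - k) 1 = [] := by
      rw [PySem.List.pyRange_one, show (b - (k:Int) - a).toNat = 0 by omega]; rfl
    rw [h1, h2, pvCombs]; rfl
  | succ n ih =>
    intro a b h
    have hab : a < b := by omega
    rw [PySem.List.pyRange_one_cons hab, pvCombs,
      ih (a + 1) b (by omega)]
    by_cases hk : a < b - k
    · rw [PySem.List.pyRange_one_cons hk, List.flatMap_cons]
    · have h2 : PySem.List.pyRange a (b - k) 1 = [] := by
        rw [PySem.List.pyRange_one, show (b - (k:Int) - a).toNat = 0 by omega]; rfl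
      have h3 : PySem.List.pyRange (a + 1) (b - k) 1 = [] := by
        rw [PySem.List.pyRange_one, show (b - (k:Int) - (a+1)).toNat = 0 by omega]; rfl
      rw [h2, h3, pvCombs_eq_nil _ k (by rw [PySem.List.length_pyRange_one]; omega)]
      rfl

theorem pvSliceLen (xs : List String) (a : Int) :
    PySem.List.slice xs (some a) none = PySem.List.slice xs (some a) (some (xs.length : Int)) := by
  simp [PySem.List.slice, PySem.List.clampIdx]; split_ifs <;> omega

theorem pvRange_shift (a b : Int) :
    PySem.List.pyRange (a + 1) (b + 1) 1 = (PySem.List.pyRange a b 1).map (· + 1) := by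
  rw [PySem.List.pyRange_one, PySem.List.pyRange_one, List.map_map,
    show (b + 1 - (a + 1)).toNat = (b - a).toNat by omega]
  apply List.map_congr_left
  intro k _
  simp [Function.comp]; ring

theorem pvAdj_cons_cons (services : List String) (x y : Int) (t : List Int) :
    pvAdj services (x :: y :: t)
      = PySem.List.slice services (some (x + 1)) (some (y + 1)) :: pvAdj services (y :: t) := rfl

theorem pvPartition_eq (services : List String) : ∀ (k : Nat) (s : Int),
    pvPartition services (services.length : Int) s (k + 1)
      = (pvCombs (PySem.List.pyRange s ((services.length : Int) - 1) 1) k).map (fun idx =>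
          pvAdj services ((s - 1) :: idx ++ [(services.length : Int) - 1])) := by
  intro k
  induction k with
  | zero =>
    intro s
    rw [pvPartition, pvCombs]
    simp only [List.map_cons, List.map_nil, List.nil_append, List.cons_append, pvAdj]
    rw [pvSliceLen, show s - 1 + 1 = s by ring,
      show (services.length : Int) - 1 + 1 = (services.length : Int) by ring]
  | succ k ih =>
    intro s
    rw [pvPartition,
      show (services.length : Int) - ((k : Int) + 2) + 2 = ((services.length : Int) - 1 - k) + 1 by ring,
      pvRange_shift s ((services.length : Int) - 1 - k),
      pvCombs_range_split k ((services.length : Int) - 1 - s).toNat s ((services.length : Int) - 1) rfl,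
      List.map_flatMap, List.flatMap_map]
    apply List.flatMap_congr
    intro x _
    rw [ih (x + 1), List.map_map, List.map_map]
    apply List.map_congr_left
    intro idx _
    simp only [Function.comp_apply, List.cons_append]
    rw [show x + 1 - 1 = x by ring, pvAdj_cons_cons,
      show s - 1 + 1 = s by ring]

-- ===== VERDICT (by name: the statement is the Claim_ definition above) =====
theorem generate_service_combinations_spec : Claim_equal_generate_service_combinations := by
  intro services num_software _hdom hpre
  unfold Spec_generate_service_combinations
  unfold Pre_generate_service_combinations at hpre
  unfold generate_service_combinations generate_service_combinations_alt
  rw [if_neg (by omega), if_neg (by omega),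
    show num_software.toNat = (num_software - 1).toNat + 1 by omega,
    pvPartition_eq services ((num_software - 1).toNat) 0]
  apply List.map_congr_left
  intro idx _
  rw [pvComprehension_eq_adj services ([-1] ++ idx ++ [(services.length : Int) - 1])]
  norm_num
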